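-- pv_equiv track=rewrite | github.com/tugraskan/swatplus-dataselector | scripts/hru_processor.py | _expand_element_tokens
-- ===== SOURCE A (Python) =====
-- def _expand_element_tokens(tokens: list[str]) -> list[int]:
--     values: list[int] = []
--     for token in tokens:
--         try:
--             values.append(int(token))
--         except ValueError:
--             continue
--
--     expanded: list[int] = []
--     index = 0
--     while index < len(values):
--         if index + 1 < len(values) and values[index + 1] < 0:
--             start = values[index]
--             end = abs(values[index + 1])
--             step = 1 if start <= end else -1
--             expanded.extend(range(start, end + step, step))
--             index += 2
--         else:
--             expanded.append(values[index])
--             index += 1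
--     return expanded
-- ===== SOURCE B (Python) =====
-- def _expand_element_tokens(tokens: list[str]) -> list[int]:
--     expanded: list[int] = []
--     pending = None
--     for token in tokens:
--         try:
--             v = int(token)
--         except ValueError:
--             continue
--         if pending is None:
--             pending = v
--         elif v < 0:
--             end = abs(v)
--             step = 1 if pending <= end else -1
--             expanded.extend(range(pending, end + step, step))
--             pending = None
--         else:
--             expanded.append(pending)
--             pending = v
--     if pending is not None:
--         expanded.append(pending)
--     return expanded
-- ===== Notes on version B (the rewrite author's own statement) =====
-- stated objective: alternative
-- what changed: Fused the two phases (token parsing, then an index/lookahead while-loop over the intermediate values list) into one pass over tokens with a single pending-value state machine; the intermediate list and index arithmetic disappear.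
import Mathlib
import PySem

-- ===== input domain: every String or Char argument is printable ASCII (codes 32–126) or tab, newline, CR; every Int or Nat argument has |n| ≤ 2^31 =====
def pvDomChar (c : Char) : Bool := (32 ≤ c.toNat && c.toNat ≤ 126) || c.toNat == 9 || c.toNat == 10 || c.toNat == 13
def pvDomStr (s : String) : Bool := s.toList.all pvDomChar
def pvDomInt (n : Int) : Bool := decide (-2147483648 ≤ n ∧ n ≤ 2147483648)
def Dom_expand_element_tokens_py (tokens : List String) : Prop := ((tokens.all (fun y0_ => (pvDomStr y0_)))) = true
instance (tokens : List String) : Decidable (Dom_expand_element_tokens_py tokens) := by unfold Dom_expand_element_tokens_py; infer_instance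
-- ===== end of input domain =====

-- B fuses A's two phases (parse to a values list, then a while-loop with index lookahead)
-- into one pass over the tokens carrying a single pending value (objective: alternative decomposition).

-- ===== PORT A =====
-- the first for-loop of A: collect int(token) into values, skipping ValueError
def pvAValues (tokens : List String) : List Int :=
  tokens.foldl (fun acc t =>
    match PySem.Int.ofStr? t with
    | some v => acc ++ [v]
    | none => acc) []

-- the while-loop of A over values, by index with lookahead values[index+1]
def pvAExpand : List Int → List Int
  | [] => []
  | [a] => [a]
  | a :: b :: rest =>
    if b < 0 then
      PySem.List.pyRange a (|b| + (if a ≤ |b| then 1 else -1)) (if a ≤ |b| then 1 else -1)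
        ++ pvAExpand rest
    else
      a :: pvAExpand (b :: rest)

def expand_element_tokens_py (tokens : List String) : List Int :=
  pvAExpand (pvAValues tokens)

-- ===== PORT B =====
-- one fold step: parse the token; update (expanded, pending)
def pvBStep (st : List Int × Option Int) (t : String) : List Int × Option Int :=
  match PySem.Int.ofStr? t with
  | none => st
  | some v =>
    match st.2 with
    | none => (st.1, some v)
    | some p =>
      if v < 0 then
        (st.1 ++ PySem.List.pyRange p (|v| + (if p ≤ |v| then 1 else -1)) (if p ≤ |v| then 1 else -1), none)
      else
        (st.1 ++ [p], some v)

def expand_element_tokens_py_alt (tokens : List String) : List Int :=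
  let st := tokens.foldl pvBStep ([], none)
  match st.2 with
  | none => st.1
  | some p => st.1 ++ [p]

-- ===== PRECONDITION & SPEC =====
def Spec_expand_element_tokens_py (tokens : List String) (out : List Int) : Prop := out = expand_element_tokens_py_alt tokens
instance (tokens : List String) (out : List Int) : Decidable (Spec_expand_element_tokens_py tokens out) := by unfold Spec_expand_element_tokens_py; infer_instance

-- ===== CLAIM (what is proved, stated in full; the proofs are below) =====
def Claim_equal_expand_element_tokens_py : Prop := ∀ (tokens : List String), Dom_expand_element_tokens_py tokens → Spec_expand_element_tokens_py tokens (expand_element_tokens_py tokens)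

-- ===== LEMMAS AND PROOFS =====

-- the Int-level step of B, after parsing
def pvGStep (st : List Int × Option Int) (v : Int) : List Int × Option Int :=
  match st.2 with
  | none => (st.1, some v)
  | some p =>
    if v < 0 then
      (st.1 ++ PySem.List.pyRange p (|v| + (if p ≤ |v| then 1 else -1)) (if p ≤ |v| then 1 else -1), none)
    else
      (st.1 ++ [p], some v)

def pvFlush (st : List Int × Option Int) : List Int :=
  match st.2 with
  | none => st.1
  | some p => st.1 ++ [p]

theorem pvBStep_eq_gStep (tokens : List String) (st : List Int × Option Int) :
    tokens.foldl pvBStep st = (tokens.filterMap PySem.Int.ofStr?).foldl pvGStep st := by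
  induction tokens generalizing st with
  | nil => rfl
  | cons t ts ih =>
    simp only [List.foldl_cons, List.filterMap_cons]
    cases h : PySem.Int.ofStr? t with
    | none => simp only [pvBStep, h]; exact ih st
    | some v => simp only [pvBStep, h, List.foldl_cons]; exact ih _

theorem pvAValues_eq_filterMap (tokens : List String) :
    pvAValues tokens = tokens.filterMap PySem.Int.ofStr? := by
  have key : ∀ (ts : List String) (acc : List Int),
      ts.foldl (fun acc t =>
        match PySem.Int.ofStr? t with
        | some v => acc ++ [v]
        | none => acc) acc = acc ++ ts.filterMap PySem.Int.ofStr? := by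
    intro ts
    induction ts with
    | nil => intro acc; simp
    | cons t ts ih =>
      intro acc
      simp only [List.foldl_cons, List.filterMap_cons]
      cases h : PySem.Int.ofStr? t with
      | none => exact ih acc
      | some v => simp only [ih (acc ++ [v]), List.append_assoc]; rfl
  simpa [pvAValues] using key tokens []

theorem pvG_invariant (vs : List Int) :
    (∀ out, pvFlush (vs.foldl pvGStep (out, none)) = out ++ pvAExpand vs) ∧
    (∀ out p, pvFlush (vs.foldl pvGStep (out, some p)) = out ++ pvAExpand (p :: vs)) := by
  induction vs with
  | nil =>
    constructor
    · intro out; simp [pvFlush, pvAExpand]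
    · intro out p; simp [pvFlush, pvAExpand]
  | cons v vs ih =>
    constructor
    · intro out
      simpa [pvGStep] using ih.2 out v
    · intro out p
      simp only [List.foldl_cons, pvGStep]
      by_cases hv : v < 0
      · simp only [hv, if_pos]
        rw [ih.1]
        simp [pvAExpand, hv, List.append_assoc]
      · simp only [hv, if_neg, not_false_iff]
        rw [ih.2]
        have : pvAExpand (p :: v :: vs) = p :: pvAExpand (v :: vs) := by
          simp [pvAExpand, hv]
        simp [this, List.append_assoc]

-- ===== VERDICT (by name: the statement is the Claim_ definition above) =====
theorem expand_element_tokens_py_spec : Claim_equal_expand_element_tokens_py := by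
  intro tokens _
  unfold Spec_expand_element_tokens_py expand_element_tokens_py expand_element_tokens_py_alt
  rw [pvBStep_eq_gStep, pvAValues_eq_filterMap]
  simpa [pvFlush] using ((pvG_invariant (tokens.filterMap PySem.Int.ofStr?)).1 []).symm
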